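-- pv_equiv track=rewrite | github.com/alanhc/algorithm | hackerrank/t1.py | getMaximumMEX
-- ===== SOURCE A (Python) =====
-- def getMaximumMEX(arr):
--     arr.sort()
--     ans = 0
--     for i in range(len(arr)):
--         if arr[i] >= ans:
--             ans += 1
--         else:
--             break
--     return ans
-- ===== SOURCE B (Python) =====
-- def getMaximumMEX(arr):
--     # Counting/bucket approach: O(n) instead of sorting. Does not mutate arr
--     # (A sorts it in place); the return value is identical.
--     n = len(arr)
--     neg = 0
--     cnt = [0] * n
--     for x in arr:
--         if x < 0:
--             neg += 1
--         elif x < n: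
--             cnt[x] += 1
--     cum = neg  # number of elements strictly below i
--     for i in range(n):
--         if cum > i:
--             return i
--         cum += cnt[i]
--     return n
-- ===== Notes on version B (the rewrite author's own statement) =====
-- stated objective: faster
-- what changed: Replaced sort-then-scan with a counting/bucket pass (values clamped into [0,n) plus a negatives counter) followed by a linear cumulative-count scan; B also does not mutate arr, while A sorts it in place (return value identical).
import Mathlib
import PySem

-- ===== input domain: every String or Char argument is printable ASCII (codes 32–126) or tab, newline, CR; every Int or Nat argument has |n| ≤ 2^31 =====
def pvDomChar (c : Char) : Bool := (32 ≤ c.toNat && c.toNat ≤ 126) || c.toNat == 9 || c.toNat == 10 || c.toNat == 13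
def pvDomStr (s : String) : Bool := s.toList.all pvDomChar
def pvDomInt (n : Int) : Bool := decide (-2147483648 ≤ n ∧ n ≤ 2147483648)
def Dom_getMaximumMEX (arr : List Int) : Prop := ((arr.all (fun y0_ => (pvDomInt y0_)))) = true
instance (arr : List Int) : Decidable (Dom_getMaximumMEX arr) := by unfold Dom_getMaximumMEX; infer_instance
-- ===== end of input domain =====

-- B replaces A's sort-then-scan with a counting/bucket pass and a linear cumulative scan.
-- A sorts its argument in place, B does not mutate it: the equivalence proved here is about the return value.

-- ===== PORT A =====
-- A's for-loop over the sorted array with break: sequential traversal carrying ans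
def pvLoopA : List Int → Int → Int
  | [], ans => ans
  | x :: rest, ans => if ans ≤ x then pvLoopA rest (ans + 1) else ans

def getMaximumMEX (arr : List Int) : Int :=
  pvLoopA (PySem.List.sorted arr (fun x => x) false) 0

-- ===== PORT B =====
-- B's first loop body: classify x as negative / in-range bucket / too large
def pvStep (n : Int) (s : Int × List Int) (x : Int) : Int × List Int :=
  if x < 0 then (s.1 + 1, s.2)
  else if x < n then (s.1, PySem.List.pySetD s.2 x (PySem.List.pyGetD s.2 x 0 + 1))
  else s

-- B's second loop: 'for i in range(n): if cum > i: return i; cum += cnt[i]' then 'return n'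
-- (walks the count list carrying i; on exhaustion i has reached n, so returning i is 'return n')
def pvScanB : List Int → Int → Int → Int
  | [], _, i => i
  | c :: rest, cum, i => if i < cum then i else pvScanB rest (cum + c) (i + 1)

def getMaximumMEX_alt (arr : List Int) : Int :=
  let n : Int := arr.length
  let s := arr.foldl (pvStep n) (0, List.replicate arr.length 0)
  pvScanB s.2 s.1 0

-- ===== PRECONDITION & SPEC =====
def Spec_getMaximumMEX (arr : List Int) (out : Int) : Prop := out = getMaximumMEX_alt arr
instance (arr : List Int) (out : Int) : Decidable (Spec_getMaximumMEX arr out) := by unfold Spec_getMaximumMEX; infer_instance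

-- ===== CLAIM (what is proved, stated in full; the proofs are below) =====
def Claim_equal_getMaximumMEX : Prop := ∀ (arr : List Int), Dom_getMaximumMEX arr → Spec_getMaximumMEX arr (getMaximumMEX arr)

-- ===== LEMMAS AND PROOFS =====

-- number of elements of arr strictly below i
def cntLt (arr : List Int) (i : Int) : Int := (arr.countP (fun x => decide (x < i)) : Int)

-- the characterisation both programs' results satisfy: r is the unique value in [0, n]
-- with cntLt ≤ i before it and cntLt > r at it (when r < n)
def GoodRes (arr : List Int) (r : Int) : Prop :=
  0 ≤ r ∧ r ≤ arr.length ∧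
  (∀ i : Int, 0 ≤ i → i < r → cntLt arr i ≤ i) ∧
  (r < arr.length → r < cntLt arr r)

theorem goodRes_unique (arr : List Int) (r1 r2 : Int)
    (h1 : GoodRes arr r1) (h2 : GoodRes arr r2) : r1 = r2 := by
  obtain ⟨a1, b1, c1, d1⟩ := h1
  obtain ⟨a2, b2, c2, d2⟩ := h2
  by_contra hne
  rcases lt_or_gt_of_ne hne with h | h
  · have := c2 r1 a1 h
    have := d1 (by omega)
    omega
  · have := c1 r2 a2 h
    have := d2 (by omega)
    omega

theorem loopA_char (s : List Int) : ∀ (a : Int),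
    ∃ k : Nat, pvLoopA s a = a + k ∧ k ≤ s.length ∧
      (∀ j : Nat, j < k → ∀ h : j < s.length, a + j ≤ s[j]) ∧
      (∀ h : k < s.length, s[k] < a + k) := by
  induction s with
  | nil => intro a; exact ⟨0, by simp [pvLoopA]⟩
  | cons x t ih =>
    intro a
    by_cases hx : a ≤ x
    · obtain ⟨k', h1, h2, h3, h4⟩ := ih (a + 1)
      refine ⟨k' + 1, ?_, by simp; omega, ?_, ?_⟩
      · simp only [pvLoopA, if_pos hx, h1]; push_cast; ring
      · intro j hj h
        cases j with
        | zero => simpa using hx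
        | succ j' =>
          have := h3 j' (by omega) (by simpa using h)
          simp only [List.getElem_cons_succ]
          push_cast at this ⊢
          omega
      · intro h
        have := h4 (by simpa using h)
        simp only [List.getElem_cons_succ]
        push_cast at this ⊢
        omega
    · refine ⟨0, ?_, by simp, by omega, ?_⟩
      · simp [pvLoopA, hx]
      · intro h
        simpa using by omega

-- on a value-monotone list, s[i] < c exactly when more than i elements are < c
theorem sorted_get_iff (s : List Int)
    (hs : ∀ p q : Nat, (hpq : p ≤ q) → (hq : q < s.length) → s[p]'(by omega) ≤ s[q])
    (i : Nat) (hi : i < s.length) (c : Int) : s[i] < c ↔ (i : Int) < cntLt s c := by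
  unfold cntLt
  constructor
  · intro h
    have hsplit : s.countP (fun x => decide (x < c)) =
        (s.take (i+1)).countP (fun x => decide (x < c)) +
        (s.drop (i+1)).countP (fun x => decide (x < c)) := by
      rw [← List.countP_append, List.take_append_drop]
    have hall : (s.take (i+1)).countP (fun x => decide (x < c)) = (s.take (i+1)).length := by
      rw [List.countP_eq_length]
      intro x hx
      rw [List.mem_iff_getElem] at hx
      obtain ⟨j, hj, rfl⟩ := hx
      have hj' : j < s.length := by
        have := hj; simp [List.length_take] at this; omega
      have : (s.take (i+1))[j]'hj = s[j]'hj' := List.getElem_take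
      rw [this]
      have hji : j ≤ i := by simp [List.length_take] at hj; omega
      have := hs j i hji hi
      simp; omega
    have hlen : (s.take (i+1)).length = i + 1 := by simp [List.length_take]; omega
    omega
  · intro h
    by_contra hge
    push Not at hge
    have hsplit : s.countP (fun x => decide (x < c)) =
        (s.take i).countP (fun x => decide (x < c)) +
        (s.drop i).countP (fun x => decide (x < c)) := by
      rw [← List.countP_append, List.take_append_drop]
    have hzero : (s.drop i).countP (fun x => decide (x < c)) = 0 := by
      rw [List.countP_eq_zero]
      intro x hx
      rw [List.mem_iff_getElem] at hx
      obtain ⟨j, hj, rfl⟩ := hx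
      have hj' : i + j < s.length := by simp [List.length_drop] at hj; omega
      have : (s.drop i)[j]'hj = s[i+j]'hj' := by
        simp [List.getElem_drop]
      rw [this]
      have := hs i (i+j) (by omega) hj'
      simp; omega
    have : (s.take i).countP (fun x => decide (x < c)) ≤ i := by
      have := List.countP_le_length (l := s.take i) (p := fun x => decide (x < c))
      simp [List.length_take] at this; omega
    omega

theorem A_good (arr : List Int) : GoodRes arr (getMaximumMEX arr) := by
  have hperm := PySem.List.sorted_perm arr (fun x => x) false
  set s := PySem.List.sorted arr (fun x => x) false with hsdef
  have hlen : s.length = arr.length := PySem.List.length_sorted arr _ false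
  have hcnt : ∀ c : Int, cntLt s c = cntLt arr c := by
    intro c; unfold cntLt; rw [hperm.countP_eq]
  have hmono : ∀ p q : Nat, (hpq : p ≤ q) → (hq : q < s.length) → s[p]'(by omega) ≤ s[q] := by
    intro p q hpq hq
    exact PySem.List.sorted_id_getElem_mono arr hpq hq
  obtain ⟨k, h1, h2, h3, h4⟩ := loopA_char s 0
  have hA : getMaximumMEX arr = (k : Int) := by
    unfold getMaximumMEX
    rw [← hsdef, h1]
    omega
  rw [hA]
  refine ⟨by omega, by omega, ?_, ?_⟩
  · intro i hi0 hik
    have hj : i.toNat < s.length := by omega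
    have := h3 i.toNat (by omega) hj
    have hnot : ¬ s[i.toNat] < (i.toNat : Int) := by omega
    rw [sorted_get_iff s hmono i.toNat hj (i.toNat : Int)] at hnot
    rw [hcnt] at hnot
    have hi' : i = (i.toNat : Int) := by omega
    rw [hi']
    omega
  · intro hk
    have hk' : k < s.length := by omega
    have := h4 hk'
    have := (sorted_get_iff s hmono k hk' (k : Int)).mp (by omega)
    rw [hcnt] at this
    omega

theorem foldB_inv (n : Int) (l : List Int) : ∀ (neg : Int) (cnt : List Int),
    n ≤ cnt.length →
    ((l.foldl (pvStep n) (neg, cnt)).2.length = cnt.length ∧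
     (l.foldl (pvStep n) (neg, cnt)).1 = neg + (l.countP (fun x => decide (x < 0)) : Int) ∧
     ∀ v : Nat, v < cnt.length → ((v : Int) < n) →
       (l.foldl (pvStep n) (neg, cnt)).2.getD v 0 = cnt.getD v 0 + (l.count (v : Int) : Int)) := by
  induction l with
  | nil => intro neg cnt hn; refine ⟨rfl, by simp, by intro v _ _; simp⟩
  | cons x t ih =>
    intro neg cnt hn
    by_cases h1 : x < 0
    · have step : pvStep n (neg, cnt) x = (neg + 1, cnt) := by simp [pvStep, h1]
      obtain ⟨a, b, c⟩ := ih (neg + 1) cnt hn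
      refine ⟨?_, ?_, ?_⟩
      · rw [List.foldl_cons, step, a]
      · rw [List.foldl_cons, step, b, List.countP_cons]
        simp [h1]
        omega
      · intro v hv hvn
        have hne : x ≠ (v : Int) := by omega
        rw [List.foldl_cons, step, c v hv hvn, List.count_cons]
        simp [hne]
    · by_cases h2 : x < n
      · have hxlt : x.toNat < cnt.length := by omega
        have hset : PySem.List.pySetD cnt x (PySem.List.pyGetD cnt x 0 + 1)
            = cnt.set x.toNat (cnt.getD x.toNat 0 + 1) := by
          rw [PySem.List.pySetD_of_nonneg cnt _ (by omega),
              PySem.List.pyGetD_eq_getElem cnt 0 (by omega) (by omega),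
              List.getD_eq_getElem cnt 0 hxlt]
        have step : pvStep n (neg, cnt) x = (neg, cnt.set x.toNat (cnt.getD x.toNat 0 + 1)) := by
          simp [pvStep, h1, h2, hset]
        have hlen : (cnt.set x.toNat (cnt.getD x.toNat 0 + 1)).length = cnt.length := by simp
        obtain ⟨a, b, c⟩ := ih neg (cnt.set x.toNat (cnt.getD x.toNat 0 + 1)) (by rw [hlen]; exact hn)
        refine ⟨?_, ?_, ?_⟩
        · rw [List.foldl_cons, step, a, hlen]
        · rw [List.foldl_cons, step, b, List.countP_cons]
          simp [h1]
        · intro v hv hvn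
          have hcv := c v (by omega) hvn
          rw [List.foldl_cons, step, hcv, List.count_cons]
          by_cases hvx : (v : Int) = x
          · have hvx' : v = x.toNat := by omega
            subst hvx'
            rw [List.getD_eq_getElem _ 0 (by simpa using hxlt), List.getElem_set_self,
                List.getD_eq_getElem cnt 0 hxlt]
            have hbeq : (x == ((x.toNat : Nat) : Int)) = true := by simpa using hvx.symm
            simp
            omega
          · have hne : x ≠ (v : Int) := fun h => hvx h.symm
            rw [List.getD_eq_getElem _ 0 (by simpa using hv), List.getElem_set_ne (by omega),
                List.getD_eq_getElem cnt 0 hv]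
            simp [hne]
      · have step : pvStep n (neg, cnt) x = (neg, cnt) := by simp [pvStep, h1, h2]
        obtain ⟨a, b, c⟩ := ih neg cnt hn
        refine ⟨?_, ?_, ?_⟩
        · rw [List.foldl_cons, step, a]
        · rw [List.foldl_cons, step, b, List.countP_cons]
          simp [h1]
        · intro v hv hvn
          have hne : x ≠ (v : Int) := by omega
          rw [List.foldl_cons, step, c v hv hvn, List.count_cons]
          simp [hne]

theorem scanB_char (cs : List Int) : ∀ (cum i : Int),
    ∃ k : Nat, pvScanB cs cum i = i + k ∧ k ≤ cs.length ∧
      (∀ j : Nat, j < k → cum + (cs.take j).sum ≤ i + j) ∧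
      (k < cs.length → i + k < cum + (cs.take k).sum) := by
  induction cs with
  | nil => intro cum i; exact ⟨0, by simp [pvScanB]⟩
  | cons c rest ih =>
    intro cum i
    by_cases hc : i < cum
    · exact ⟨0, by simp [pvScanB, hc], by simp, by omega, by simpa using hc⟩
    · obtain ⟨k', h1, h2, h3, h4⟩ := ih (cum + c) (i + 1)
      refine ⟨k' + 1, ?_, by simp; omega, ?_, ?_⟩
      · simp only [pvScanB, if_neg hc, h1]; push_cast; ring
      · intro j hj
        cases j with
        | zero => simp; omega
        | succ j' =>
          have := h3 j' (by omega)
          simp only [List.take_succ_cons, List.sum_cons]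
          push_cast at this ⊢
          omega
      · intro h
        have := h4 (by simpa using h)
        simp only [List.take_succ_cons, List.sum_cons]
        push_cast at this ⊢
        omega

theorem cntLt_step (arr : List Int) (j : Int) :
    cntLt arr (j + 1) = cntLt arr j + (arr.count j : Int) := by
  unfold cntLt
  induction arr with
  | nil => simp
  | cons x t ih =>
    simp only [List.countP_cons, List.count_cons]
    by_cases h1 : x < j
    · have h2 : x < j + 1 := by omega
      have h3 : ¬ (x = j) := by omega
      simp [h1, h2, h3] at *
      omega
    · by_cases h3 : x = j
      · have h2 : x < j + 1 := by omega
        simp [h3] at *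
        omega
      · have h2 : ¬ (x < j + 1) := by omega
        simp [h1, h2, h3] at *
        omega

theorem B_good (arr : List Int) : GoodRes arr (getMaximumMEX_alt arr) := by
  obtain ⟨a, b, c⟩ := foldB_inv (arr.length : Int) arr 0 (List.replicate arr.length 0) (by simp)
  set st := arr.foldl (pvStep (arr.length : Int)) (0, List.replicate arr.length 0) with hst
  have hlen : st.2.length = arr.length := by simpa using a
  -- the cumulative count at step j is exactly cntLt arr j
  have hbridge : ∀ j : Nat, j ≤ arr.length → st.1 + (st.2.take j).sum = cntLt arr (j : Int) := by
    intro j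
    induction j with
    | zero =>
      intro _
      have : cntLt arr 0 = (arr.countP (fun x => decide (x < 0)) : Int) := rfl
      simpa [this] using b
    | succ j' ihj =>
      intro hj
      have hj' : j' < st.2.length := by omega
      rw [List.sum_take_succ st.2 j' hj']
      have hv := c j' (by omega) (by omega)
      rw [List.getD_eq_getElem st.2 0 hj'] at hv
      have hgd : (List.replicate arr.length (0:Int)).getD j' 0 = 0 := by
        rw [List.getD_eq_getElem (List.replicate arr.length (0:Int)) 0 (by simp; omega)]
        simp
      rw [hgd] at hv
      have hstep := cntLt_step arr (j' : Int)
      have := ihj (by omega)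
      push_cast
      omega
  obtain ⟨k, h1, h2, h3, h4⟩ := scanB_char st.2 st.1 0
  have hB0 : getMaximumMEX_alt arr = pvScanB st.2 st.1 0 := rfl
  have hB : getMaximumMEX_alt arr = (k : Int) := by
    rw [hB0, h1]
    omega
  rw [hB]
  refine ⟨by omega, by omega, ?_, ?_⟩
  · intro i hi0 hik
    have hj := h3 i.toNat (by omega)
    rw [hbridge i.toNat (by omega)] at hj
    have hi' : i = (i.toNat : Int) := by omega
    rw [hi']
    omega
  · intro hk
    have := h4 (by omega)
    rw [hbridge k (by omega)] at this
    omega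

-- ===== VERDICT (by name: the statement is the Claim_ definition above) =====
theorem getMaximumMEX_spec : Claim_equal_getMaximumMEX := by
  intro arr _
  unfold Spec_getMaximumMEX
  exact goodRes_unique arr _ _ (A_good arr) (B_good arr)
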